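-- pv_equiv track=rewrite | github.com/curoa/procon | montmort_number/main.py | make_montmort_numbers
-- ===== SOURCE A (Python) =====
-- def make_montmort_numbers(size, mod):
--     montmort_numbers = [0] * (size + 1)
--     signed_one = 1
--     for i in range(2, len(montmort_numbers)):
--         montmort_numbers[i] = i * montmort_numbers[i-1] % mod + signed_one
--         montmort_numbers[i] %= mod
--         signed_one *= -1
--     return montmort_numbers
-- ===== SOURCE B (Python) =====
-- def make_montmort_numbers(size, mod):
--     res = [0] * (size + 1)
--     prev2, prev1 = 1, 0  # D(0), D(1) seed the two-term recurrence internally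
--     for i in range(2, size + 1):
--         cur = (i - 1) * (prev1 + prev2) % mod
--         res[i] = cur
--         prev2, prev1 = prev1, cur
--     return res
-- ===== Notes on version B (the rewrite author's own statement) =====
-- stated objective: alternative
-- what changed: Replaces the one-term recurrence i*D(i-1)+(-1)^i with alternating-sign state by the two-term recurrence D(i)=(i-1)*(D(i-1)+D(i-2)) kept in two rolling variables seeded internally with D(0)=1, D(1)=0.
import Mathlib
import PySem

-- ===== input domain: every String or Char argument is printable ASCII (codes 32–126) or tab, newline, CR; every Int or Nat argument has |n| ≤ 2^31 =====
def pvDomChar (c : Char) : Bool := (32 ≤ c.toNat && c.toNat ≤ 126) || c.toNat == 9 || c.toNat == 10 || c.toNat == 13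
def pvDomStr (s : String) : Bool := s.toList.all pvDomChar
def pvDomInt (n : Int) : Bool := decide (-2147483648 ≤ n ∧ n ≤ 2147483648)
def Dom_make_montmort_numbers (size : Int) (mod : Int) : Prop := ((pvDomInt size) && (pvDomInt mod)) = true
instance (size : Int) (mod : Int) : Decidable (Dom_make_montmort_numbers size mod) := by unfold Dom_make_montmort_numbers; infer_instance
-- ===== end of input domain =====

-- B replaces A's one-term recurrence i*D(i-1)+(-1)^i (with an alternating-sign variable)
-- by the two-term recurrence D(i) = (i-1)*(D(i-1)+D(i-2)) kept in two rolling variables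
-- seeded internally with D(0)=1, D(1)=0 (objective: alternative; same O(size) cost).

-- ===== PORT A =====
-- loop body of A: m[i] = i*m[i-1] % mod + signed_one; m[i] %= mod; signed_one *= -1
-- (indices 1 ≤ i-1 < i < len(m) are always in range, so the total pyGetD/pySetD are exact here)
def pvStepA (mod : Int) (st : List Int × Int) (i : Int) : List Int × Int :=
  let v := PySem.Int.mod (i * PySem.List.pyGetD st.1 (i - 1) 0) mod + st.2
  let m1 := PySem.List.pySetD st.1 i v
  let m2 := PySem.List.pySetD m1 i (PySem.Int.mod (PySem.List.pyGetD m1 i 0) mod)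
  (m2, st.2 * (-1))

def pvStepB (mod : Int) (st : List Int × Int × Int) (i : Int) : List Int × Int × Int :=
  let cur := PySem.Int.mod ((i - 1) * (st.2.2 + st.2.1)) mod
  (PySem.List.pySetD st.1 i cur, st.2.2, cur)

def make_montmort_numbers (size : Int) (mod : Int) : List Int :=
  let m0 : List Int := List.replicate (size + 1).toNat 0
  ((PySem.List.pyRange 2 (PySem.List.len m0) 1).foldl (pvStepA mod) (m0, 1)).1

-- ===== PORT B =====
-- loop body of B: cur = (i-1)*(prev1+prev2) % mod; res[i] = cur; prev2, prev1 = prev1, cur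
-- (pvStepB is defined above with pvStepA)
def make_montmort_numbers_alt (size : Int) (mod : Int) : List Int :=
  ((PySem.List.pyRange 2 (size + 1) 1).foldl (pvStepB mod) (List.replicate (size + 1).toNat 0, 1, 0)).1

-- ===== PRECONDITION & SPEC =====
-- A (and B alike) raises ZeroDivisionError when mod = 0 and the loop runs (size ≥ 2); only those inputs are excluded.
def Pre_make_montmort_numbers (size : Int) (mod : Int) : Prop := mod ≠ 0 ∨ size ≤ 1
instance (size : Int) (mod : Int) : Decidable (Pre_make_montmort_numbers size mod) := by unfold Pre_make_montmort_numbers; infer_instance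

def pvWitness_make_montmort_numbers : Int × Int := (6, 9)

def Spec_make_montmort_numbers (size : Int) (mod : Int) (out : List Int) : Prop := out = make_montmort_numbers_alt size mod
instance (size : Int) (mod : Int) (out : List Int) : Decidable (Spec_make_montmort_numbers size mod out) := by unfold Spec_make_montmort_numbers; infer_instance

-- ===== CLAIM (what is proved, stated in full; the proofs are below) =====
def Claim_equal_make_montmort_numbers : Prop := ∀ (size : Int) (mod : Int), Dom_make_montmort_numbers size mod → Pre_make_montmort_numbers size mod → Spec_make_montmort_numbers size mod (make_montmort_numbers size mod)

-- ===== LEMMAS AND PROOFS =====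

-- the exact derangement numbers, via the two-term recurrence
def pvD : ℕ → ℤ
  | 0 => 1
  | 1 => 0
  | (n + 2) => ((n : ℤ) + 1) * (pvD (n + 1) + pvD n)

lemma pvD_one_term (n : ℕ) : pvD (n + 2) = ((n : ℤ) + 2) * pvD (n + 1) + (-1) ^ n := by
  induction n with
  | zero => simp [pvD]
  | succ k ihD =>
    have h3 : pvD (k + 3) = ((k : ℤ) + 2) * (pvD (k + 2) + pvD (k + 1)) := by
      show pvD (k + 1 + 2) = _
      simp only [pvD]; push_cast; ring
    rw [show (k:ℕ) + 1 + 2 = k + 3 by omega, h3, ihD]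
    push_cast
    ring

lemma pymod_sub_self (a m : Int) : m ∣ PySem.Int.mod a m - a := by
  refine ⟨-(PySem.Int.floordiv a m), ?_⟩
  have := PySem.Int.floordiv_mul_add_mod a m
  linarith

lemma pymod_congr (m a b : Int) (h : m ∣ a - b) : PySem.Int.mod a m = PySem.Int.mod b m := by
  rcases eq_or_ne m 0 with rfl | hm
  · obtain rfl : a = b := by have := zero_dvd_iff.mp h; omega
    rfl
  · have hd : m ∣ PySem.Int.mod a m - PySem.Int.mod b m := by
      have h1 := pymod_sub_self a m
      have h2 := pymod_sub_self b m
      have h3 : PySem.Int.mod a m - PySem.Int.mod b m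
          = (PySem.Int.mod a m - a) - (PySem.Int.mod b m - b) + (a - b) := by ring
      rw [h3]
      exact dvd_add (dvd_sub h1 h2) h
    have hd' : |m| ∣ PySem.Int.mod a m - PySem.Int.mod b m := (abs_dvd m _).mpr hd
    have hlt : |PySem.Int.mod a m - PySem.Int.mod b m| < |m| := by
      rcases lt_or_gt_of_ne hm with hneg | hpos
      · have ba := PySem.Int.mod_neg_bounds (a := a) hneg
        have bb := PySem.Int.mod_neg_bounds (a := b) hneg
        rw [abs_of_neg hneg, abs_lt]
        constructor <;> omega
      · have ba1 := PySem.Int.mod_nonneg (a := a) hpos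
        have ba2 := PySem.Int.mod_lt (a := a) hpos
        have bb1 := PySem.Int.mod_nonneg (a := b) hpos
        have bb2 := PySem.Int.mod_lt (a := b) hpos
        rw [abs_of_pos hpos, abs_lt]
        constructor <;> omega
    have hz := Int.eq_zero_of_abs_lt_dvd hd' hlt
    omega

lemma pv_inv (mod : Int) (N n : ℕ) (h : 2 + n ≤ N) :
    (((PySem.List.pyRange 2 (2 + (n : Int)) 1).foldl (pvStepA mod) (List.replicate N (0:Int), 1)).1 =
      ((PySem.List.pyRange 2 (2 + (n : Int)) 1).foldl (pvStepB mod) (List.replicate N (0:Int), 1, 0)).1) ∧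
    (((PySem.List.pyRange 2 (2 + (n : Int)) 1).foldl (pvStepB mod) (List.replicate N (0:Int), 1, 0)).1.length = N) ∧
    (((PySem.List.pyRange 2 (2 + (n : Int)) 1).foldl (pvStepA mod) (List.replicate N (0:Int), 1)).2 = (-1) ^ n) ∧
    (mod ∣ ((PySem.List.pyRange 2 (2 + (n : Int)) 1).foldl (pvStepB mod) (List.replicate N (0:Int), 1, 0)).2.1 - pvD n) ∧
    (mod ∣ ((PySem.List.pyRange 2 (2 + (n : Int)) 1).foldl (pvStepB mod) (List.replicate N (0:Int), 1, 0)).2.2 - pvD (n + 1)) ∧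
    (((PySem.List.pyRange 2 (2 + (n : Int)) 1).foldl (pvStepB mod) (List.replicate N (0:Int), 1, 0)).1.getD (n + 1) 0 =
      ((PySem.List.pyRange 2 (2 + (n : Int)) 1).foldl (pvStepB mod) (List.replicate N (0:Int), 1, 0)).2.2) := by
  induction n with
  | zero =>
    rw [show (2 + ((0:ℕ):Int)) = 2 by norm_num, PySem.List.pyRange_one_eq_nil le_rfl]
    have h1 : 1 < N := by omega
    simp [pvD, List.getD_eq_getElem?_getD, h1]
  | succ k ih =>
    obtain ⟨hL, hlen, hs, hp2, hp1, hget⟩ := ih (by omega)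
    have hsplit : PySem.List.pyRange 2 (2 + ((k:Int)+1)) 1 = PySem.List.pyRange 2 (2+(k:Int)) 1 ++ [2+(k:Int)] := by
      have h2 := PySem.List.pyRange_one_succ_right (a := 2) (b := 2+(k:Int)) (by omega)
      rw [show (2 + ((k:Int)+1)) = (2+(k:Int))+1 by ring]
      exact h2
    push_cast
    rw [hsplit, List.foldl_append, List.foldl_append]
    set SA := (PySem.List.pyRange 2 (2+(k:Int)) 1).foldl (pvStepA mod) (List.replicate N (0:Int), 1) with hSA
    set SB := (PySem.List.pyRange 2 (2+(k:Int)) 1).foldl (pvStepB mod) (List.replicate N (0:Int), 1, 0) with hSB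
    simp only [List.foldl_cons, List.foldl_nil, pvStepA, pvStepB]
    rw [show (2+(k:Int)) - 1 = (k:Int)+1 by ring]
    have hset : ∀ (xs : List Int) (v : Int), PySem.List.pySetD xs (2+(k:Int)) v = xs.set (k+2) v := by
      intro xs v
      rw [PySem.List.pySetD_of_nonneg _ _ (by positivity)]
      have ht : ((2:Int)+(k:Int)).toNat = k+2 := by omega
      rw [ht]
    have hget1 : ∀ (xs : List Int), PySem.List.pyGetD xs ((k:Int)+1) 0 = xs.getD (k+1) 0 := by
      intro xs
      rw [PySem.List.pyGetD_of_nonneg _ _ (by positivity)]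
      have ht : ((k:Int)+1).toNat = k+1 := by omega
      rw [ht]
    have hget2 : ∀ (xs : List Int), PySem.List.pyGetD xs (2+(k:Int)) 0 = xs.getD (k+2) 0 := by
      intro xs
      rw [PySem.List.pyGetD_of_nonneg _ _ (by positivity)]
      have ht : ((2:Int)+(k:Int)).toNat = k+2 := by omega
      rw [ht]
    simp only [hset, hget1, hget2]
    have hkN : k + 2 < N := by omega
    have hkN' : k+2 < SA.1.length := by rw [hL]; omega
    have hA1 : SA.1.getD (k+1) 0 = SB.2.2 := by rw [hL]; exact hget
    have hsg : ∀ (v : Int), (SA.1.set (k+2) v).getD (k+2) 0 = v := by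
      intro v
      simp [List.getD_eq_getElem?_getD, hkN']
    rw [hA1, hs, hsg, List.set_set]
    have hD : ((k:ℤ) + 2) * pvD (k+1) + (-1)^k = ((k:ℤ)+1) * (pvD (k+1) + pvD k) := by
      have h1 := pvD_one_term k
      have h2 : pvD (k+2) = ((k:ℤ)+1) * (pvD (k+1) + pvD k) := by simp only [pvD]
      linarith
    have hX : mod ∣ (PySem.Int.mod ((2+(k:Int)) * SB.2.2) mod + (-1)^k) - (((k:Int)+1) * (SB.2.2 + SB.2.1)) := by
      have h1 := pymod_sub_self ((2+(k:Int)) * SB.2.2) mod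
      obtain ⟨x, hx⟩ := hp1
      obtain ⟨y, hy⟩ := hp2
      have h2 : mod ∣ ((2+(k:Int)) * SB.2.2 + (-1)^k) - (((k:Int)+1) * (SB.2.2 + SB.2.1)) := by
        refine ⟨((k:ℤ)+2) * x - ((k:ℤ)+1) * (x + y), ?_⟩
        linear_combination hD + ((k:ℤ)+2) * hx - ((k:ℤ)+1) * (hx + hy)
      have h3 : (PySem.Int.mod ((2+(k:Int)) * SB.2.2) mod + (-1)^k) - (((k:Int)+1) * (SB.2.2 + SB.2.1))
          = (PySem.Int.mod ((2+(k:Int)) * SB.2.2) mod - (2+(k:Int)) * SB.2.2)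
            + (((2+(k:Int)) * SB.2.2 + (-1)^k) - (((k:Int)+1) * (SB.2.2 + SB.2.1))) := by ring
      rw [h3]
      exact dvd_add h1 h2
    have hw : PySem.Int.mod (PySem.Int.mod ((2+(k:Int)) * SB.2.2) mod + (-1)^k) mod
        = PySem.Int.mod (((k:Int)+1) * (SB.2.2 + SB.2.1)) mod := pymod_congr _ _ _ hX
    have hcur : mod ∣ PySem.Int.mod (((k:Int)+1) * (SB.2.2 + SB.2.1)) mod - pvD (k+2) := by
      have h1 := pymod_sub_self (((k:Int)+1) * (SB.2.2 + SB.2.1)) mod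
      obtain ⟨x, hx⟩ := hp1
      obtain ⟨y, hy⟩ := hp2
      have h2 : mod ∣ ((k:Int)+1) * (SB.2.2 + SB.2.1) - pvD (k+2) := by
        refine ⟨((k:ℤ)+1) * (x + y), ?_⟩
        have h4 : pvD (k+2) = ((k:ℤ)+1) * (pvD (k+1) + pvD k) := by simp only [pvD]
        linear_combination ((k:ℤ)+1) * hx + ((k:ℤ)+1) * hy - h4
      have h3 : PySem.Int.mod (((k:Int)+1) * (SB.2.2 + SB.2.1)) mod - pvD (k+2)
          = (PySem.Int.mod (((k:Int)+1) * (SB.2.2 + SB.2.1)) mod - ((k:Int)+1) * (SB.2.2 + SB.2.1))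
            + (((k:Int)+1) * (SB.2.2 + SB.2.1) - pvD (k+2)) := by ring
      rw [h3]
      exact dvd_add h1 h2
    refine ⟨?_, ?_, ?_, ?_, ?_, ?_⟩
    · rw [hL, hw]
    · simp [hlen]
    · rw [pow_succ]
    · simpa using hp1
    · rw [show (k:ℕ)+1+1 = k+2 by omega]
      exact hcur
    · rw [show (k:ℕ)+1+1 = k+2 by omega]
      have hkB : k+2 < SB.1.length := by omega
      simp [List.getD_eq_getElem?_getD, hkB]

-- A equals B on every input (the Pre_ hypothesis is not needed for the ports themselves,
-- which are total; it records exactly where the Python A raises).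
lemma pv_ports_eq (size mod : Int) : make_montmort_numbers size mod = make_montmort_numbers_alt size mod := by
  simp only [make_montmort_numbers, make_montmort_numbers_alt, PySem.List.len_eq, List.length_replicate]
  by_cases hs : size ≤ 1
  · rw [PySem.List.pyRange_one_eq_nil (a := 2) (by omega), PySem.List.pyRange_one_eq_nil (a := 2) (by omega)]
    rfl
  · have hN : ((size+1).toNat : Int) = size + 1 := by omega
    set n : ℕ := (size-1).toNat with hn
    have hn2 : 2 + (n:Int) = size + 1 := by omega
    have h := pv_inv mod (size+1).toNat n (by omega)
    rw [hn2] at h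
    rw [hN]
    exact h.1

-- ===== VERDICT (by name: the statement is the Claim_ definition above) =====
theorem make_montmort_numbers_spec : Claim_equal_make_montmort_numbers := by
  intro size mod _ _
  unfold Spec_make_montmort_numbers
  exact pv_ports_eq size mod
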